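-- pv_equiv track=rewrite | github.com/greydoubt/COMPLEXITY_LAND | 16_pspace_reality_manipulation.py | check_reality_state
-- ===== SOURCE A (Python) =====
-- def check_reality_state(energy_limit, action_limit, desired_state):
--     # Recursive function to explore all possible reality states
--     def explore_reality_state(current_state, energy, actions_left):
--         # Base case: If the current state matches the desired state, return True
--         if current_state == desired_state:
--             return True
--
--         # Base case: If no energy or actions left, return False
--         if energy <= 0 or actions_left <= 0:
--             return False
--
--         # Iterate through the available reality-altering actions
--         for action in reality_altering_actions:
--             # Check if the action is a valid option based on the current state
--             if action['preconditions'](current_state):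
--                 # Simulate performing the action and explore the resulting state
--                 new_state = action['perform'](current_state)
--                 new_energy = energy - action['energy_cost']
--                 new_actions_left = actions_left - 1
--
--                 # Recursively explore the new state
--                 if explore_reality_state(new_state, new_energy, new_actions_left):
--                     return True
--
--         # If no valid action leads to the desired state, return False
--         return False
--
--     # Example reality-altering actions with their preconditions and energy costs
--     reality_altering_actions = [
--         {
--             'preconditions': lambda state: 'A' not in state,
--             'perform': lambda state: state + 'A',
--             'energy_cost': 3
--         },
--         {
--             'preconditions': lambda state: 'B' not in state,
--             'perform': lambda state: state + 'B',
--             'energy_cost': 5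
--         },
--         {
--             'preconditions': lambda state: 'C' in state,
--             'perform': lambda state: state.replace('C', ''),
--             'energy_cost': 2
--         },
--     ]
--
--     # Start with an empty initial state
--     initial_state = ''
--
--     # Call the recursive function to explore possible reality states
--     result = explore_reality_state(initial_state, energy_limit, action_limit)
--     return result
-- ===== SOURCE B (Python) =====
-- def check_reality_state(energy_limit, action_limit, desired_state):
--     # Closed form: from the empty start state only '', 'A', 'B', 'AB', 'BA'
--     # are ever reachable (the C-removal action never applies), so the search
--     # reduces to a table of minimal energy/action budgets per target state.
--     if desired_state == '':
--         return True
--     if desired_state == 'A' or desired_state == 'B':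
--         return energy_limit >= 1 and action_limit >= 1
--     if desired_state == 'AB':
--         return energy_limit >= 4 and action_limit >= 2
--     if desired_state == 'BA':
--         return energy_limit >= 6 and action_limit >= 2
--     return False
-- ===== Notes on version B (the rewrite author's own statement) =====
-- stated objective: simpler
-- what changed: Replaced the recursive state-space search with a closed-form table: only '', 'A', 'B', 'AB', 'BA' are reachable from the empty start state, each with a fixed minimal energy/action budget, so B is a plain if-chain of comparisons.
import Mathlib
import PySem

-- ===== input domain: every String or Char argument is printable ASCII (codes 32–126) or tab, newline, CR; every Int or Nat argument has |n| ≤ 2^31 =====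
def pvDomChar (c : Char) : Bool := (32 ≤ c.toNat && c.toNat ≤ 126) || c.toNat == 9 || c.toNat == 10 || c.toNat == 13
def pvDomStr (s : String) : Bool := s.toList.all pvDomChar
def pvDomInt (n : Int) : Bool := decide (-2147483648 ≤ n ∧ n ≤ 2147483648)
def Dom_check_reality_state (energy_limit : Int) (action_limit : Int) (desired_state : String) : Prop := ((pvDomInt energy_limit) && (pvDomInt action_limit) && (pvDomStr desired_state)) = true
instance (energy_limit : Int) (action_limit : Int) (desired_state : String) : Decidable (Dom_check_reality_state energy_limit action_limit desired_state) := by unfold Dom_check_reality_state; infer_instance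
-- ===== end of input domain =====

-- B replaces A's recursive search with a closed-form table of the five reachable
-- states and their minimal budgets (objective: simpler).
-- ===== PORT A =====
-- the three reality-altering actions, transcribed one-for-one; explore_reality_state
-- recurses with actions_left decreasing by 1 below the actions_left > 0 guard,
-- so termination is by actions_left.toNat.
def pvActA_pre (s : String) : Bool := ! PySem.Str.isIn "A" s
def pvActA_perform (s : String) : String := s ++ "A"
def pvActB_pre (s : String) : Bool := ! PySem.Str.isIn "B" s
def pvActB_perform (s : String) : String := s ++ "B"
def pvActC_pre (s : String) : Bool := PySem.Str.isIn "C" s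
def pvActC_perform (s : String) : String := PySem.Str.replace s "C" ""

def explore_reality_state (desired_state : String) (current_state : String) (energy : Int) (actions_left : Int) : Bool :=
  if current_state = desired_state then true
  else if energy ≤ 0 ∨ actions_left ≤ 0 then false
  else
    -- the for-loop over the three actions, with early return on a successful branch
    (if pvActA_pre current_state then
        explore_reality_state desired_state (pvActA_perform current_state) (energy - 3) (actions_left - 1)
      else false) ||
    (if pvActB_pre current_state then
        explore_reality_state desired_state (pvActB_perform current_state) (energy - 5) (actions_left - 1)
      else false) ||
    (if pvActC_pre current_state then
        explore_reality_state desired_state (pvActC_perform current_state) (energy - 2) (actions_left - 1)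
      else false)
termination_by actions_left.toNat
decreasing_by all_goals omega

def check_reality_state (energy_limit : Int) (action_limit : Int) (desired_state : String) : Bool :=
  explore_reality_state desired_state "" energy_limit action_limit

-- ===== PORT B =====
def check_reality_state_alt (energy_limit : Int) (action_limit : Int) (desired_state : String) : Bool :=
  if desired_state = "" then true
  else if desired_state = "A" ∨ desired_state = "B" then
    decide (energy_limit ≥ 1 ∧ action_limit ≥ 1)
  else if desired_state = "AB" then
    decide (energy_limit ≥ 4 ∧ action_limit ≥ 2)
  else if desired_state = "BA" then
    decide (energy_limit ≥ 6 ∧ action_limit ≥ 2)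
  else false

-- ===== PRECONDITION & SPEC =====
def Spec_check_reality_state (energy_limit : Int) (action_limit : Int) (desired_state : String) (out : Bool) : Prop := out = check_reality_state_alt energy_limit action_limit desired_state
instance (energy_limit : Int) (action_limit : Int) (desired_state : String) (out : Bool) : Decidable (Spec_check_reality_state energy_limit action_limit desired_state out) := by unfold Spec_check_reality_state; infer_instance

-- ===== CLAIM (what is proved, stated in full; the proofs are below) =====
def Claim_equal_check_reality_state : Prop := ∀ (energy_limit : Int) (action_limit : Int) (desired_state : String), Dom_check_reality_state energy_limit action_limit desired_state → Spec_check_reality_state energy_limit action_limit desired_state (check_reality_state energy_limit action_limit desired_state)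

-- ===== LEMMAS AND PROOFS =====

theorem pv_not_le_decide (e : Int) : (!decide (e ≤ 0)) = decide (0 < e) := by
  by_cases h : e ≤ 0 <;> simp [h] <;> omega

-- action preconditions evaluated at the reachable states
theorem pvA_nil : pvActA_pre "" = true := by decide
theorem pvB_nil : pvActB_pre "" = true := by decide
theorem pvC_nil : pvActC_pre "" = false := by decide
theorem pvA_A : pvActA_pre "A" = false := by decide
theorem pvB_A : pvActB_pre "A" = true := by decide
theorem pvC_A : pvActC_pre "A" = false := by decide
theorem pvA_B : pvActA_pre "B" = true := by decide
theorem pvB_B : pvActB_pre "B" = false := by decide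
theorem pvC_B : pvActC_pre "B" = false := by decide
theorem pvA_AB : pvActA_pre "AB" = false := by decide
theorem pvB_AB : pvActB_pre "AB" = false := by decide
theorem pvC_AB : pvActC_pre "AB" = false := by decide
theorem pvA_BA : pvActA_pre "BA" = false := by decide
theorem pvB_BA : pvActB_pre "BA" = false := by decide
theorem pvC_BA : pvActC_pre "BA" = false := by decide

-- from "AB" (and "BA") no action applies: the search only tests the state itself
theorem expl_AB (d : String) (e k : Int) :
    explore_reality_state d "AB" e k = decide ("AB" = d) := by
  rw [explore_reality_state]
  simp [pvA_AB, pvB_AB, pvC_AB]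

theorem expl_BA (d : String) (e k : Int) :
    explore_reality_state d "BA" e k = decide ("BA" = d) := by
  rw [explore_reality_state]
  simp [pvA_BA, pvB_BA, pvC_BA]

theorem expl_A (d : String) (e k : Int) :
    explore_reality_state d "A" e k =
      (decide ("A" = d) || (decide (0 < e) && decide (0 < k) && decide ("AB" = d))) := by
  rw [explore_reality_state]
  simp [pvA_A, pvB_A, pvC_A, pvActB_perform, expl_AB]
  by_cases h : "A" = d
  · simp [← h]
  · by_cases hab : "AB" = d <;> by_cases he : e ≤ 0 ∨ k ≤ 0 <;>
      simp_all [pv_not_le_decide]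

theorem expl_B (d : String) (e k : Int) :
    explore_reality_state d "B" e k =
      (decide ("B" = d) || (decide (0 < e) && decide (0 < k) && decide ("BA" = d))) := by
  rw [explore_reality_state]
  simp [pvA_B, pvB_B, pvC_B, pvActA_perform, expl_BA]
  by_cases h : "B" = d
  · simp [← h]
  · by_cases hba : "BA" = d <;> by_cases he : e ≤ 0 ∨ k ≤ 0 <;>
      simp_all [pv_not_le_decide]

-- decide-level bridges between the search's decremented budgets and B's thresholds
theorem pvd1 (e : Int) : decide (3 < e) = decide (4 ≤ e) := by
  by_cases h : 3 < e <;> simp [h] <;> omega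
theorem pvd2 (e : Int) : decide (5 < e) = decide (6 ≤ e) := by
  by_cases h : 5 < e <;> simp [h] <;> omega
theorem pvd3 (k : Int) : decide (1 < k) = decide (2 ≤ k) := by
  by_cases h : 1 < k <;> simp [h] <;> omega
theorem pvd4 (e : Int) : decide (0 < e) = decide (1 ≤ e) := by
  by_cases h : 0 < e <;> simp [h] <;> omega

-- ===== VERDICT (by name: the statement is the Claim_ definition above) =====
theorem check_reality_state_spec : Claim_equal_check_reality_state := by
  intro e k d _
  unfold Spec_check_reality_state check_reality_state check_reality_state_alt
  rw [explore_reality_state]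
  simp [pvA_nil, pvB_nil, pvC_nil, pvActA_perform, pvActB_perform, expl_A, expl_B]
  by_cases h0 : d = ""
  · simp [h0]
  · by_cases hA : d = "A"
    · subst hA; simp [pv_not_le_decide, pvd4]
    · by_cases hB : d = "B"
      · subst hB; simp [pv_not_le_decide, pvd4]
      · by_cases hAB : d = "AB"
        · subst hAB
          simp [pv_not_le_decide, pvd1, pvd3, pvd4]
          by_cases h4 : 4 ≤ e <;> by_cases h2k : 2 ≤ k <;>
            simp [h4, h2k] <;> omega
        · by_cases hBA : d = "BA"
          · subst hBA
            simp [pv_not_le_decide, pvd2, pvd3, pvd4]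
            by_cases h6 : 6 ≤ e <;> by_cases h2k : 2 ≤ k <;>
              simp [h6, h2k] <;> omega
          · simp [h0, hA, hB, hAB, hBA, @eq_comm String]
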